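-- pv_equiv track=rewrite | github.com/jarvensivu/advent-of-code-2023 | day_04.py | part_two
-- ===== SOURCE A (Python) =====
-- def part_two(file_content):
--     cards = [1] * len(file_content)
--
--     for i, line in enumerate(file_content):
--         numbers = line.split(":")[1].replace("|", "").split()
--         matches = len(numbers) - len(set(numbers))
--         for j in range(1, matches + 1):
--             cards[i + j] += cards[i]
--
--     return sum(cards)
-- ===== SOURCE B (Python) =====
-- def part_two(file_content):
--     # Backward dynamic programming: count[i] = total number of cards eventually
--     # produced by one copy of card i (itself plus the cascade of copies it wins),
--     # computed right-to-left; the answer is the sum over the original cards.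
--     n = len(file_content)
--     count = [1] * n
--     for i in range(n - 1, -1, -1):
--         numbers = file_content[i].split(":")[1].replace("|", "").split()
--         matches = len(numbers) - len(set(numbers))
--         count[i] = 1 + sum(count[i + j] for j in range(1, matches + 1))
--     return sum(count)
-- ===== Notes on version B (the rewrite author's own statement) =====
-- stated objective: alternative
-- what changed: B replaces A's forward copy-propagation (pushing each card's copy count onto the next cards) by a backward dynamic program computed right-to-left, where count[i] = 1 + sum of count[i+1..i+matches] is the total cascade size of one copy of card i; the answer is the same sum but the arrays hold different quantities.
import Mathlib
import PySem

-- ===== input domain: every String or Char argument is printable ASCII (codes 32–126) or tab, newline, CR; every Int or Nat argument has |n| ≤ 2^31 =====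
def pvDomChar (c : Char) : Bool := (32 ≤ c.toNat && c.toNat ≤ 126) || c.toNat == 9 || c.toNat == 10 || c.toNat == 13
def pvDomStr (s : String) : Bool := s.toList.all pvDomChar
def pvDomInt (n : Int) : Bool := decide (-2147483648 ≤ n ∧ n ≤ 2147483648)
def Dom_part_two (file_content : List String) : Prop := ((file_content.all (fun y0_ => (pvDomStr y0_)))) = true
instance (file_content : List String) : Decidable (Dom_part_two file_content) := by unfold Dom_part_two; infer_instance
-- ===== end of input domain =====

-- B replaces A's forward copy-propagation by a backward dynamic program computed right-to-left:
-- count[i] = 1 + sum(count[i+1..i+matches]) is the cascade size of one copy of card i (objective: alternative).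

-- ===== PORT A =====
-- shared parsing line: numbers = line.split(":")[1].replace("|", "").split(); matches = len(numbers) - len(set(numbers))
def matchesOf (line : String) : Nat :=
  let numbers := PySem.Str.split₀
    (PySem.Str.replace ((PySem.List.pyGet? ((PySem.Str.split? line ":").getD []) 1).getD "") "|" "")
  numbers.length - (PySem.Set.ofList numbers).length

-- inner loop of A: for j in range(1, matches+1): cards[i+j] += cards[i]   (idx = i+j runs upward, m iterations left)
def addFwdA (i : Nat) (idx : Nat) (m : Nat) (cards : List Int) : List Int :=
  match m with
  | 0 => cards
  | m' + 1 => addFwdA i (idx + 1) m' (cards.set idx (cards.getD idx 0 + cards.getD i 0))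

-- outer loop of A over enumerate(file_content)
def loopA : List String → Nat → List Int → List Int
  | [], _, cards => cards
  | line :: rest, i, cards => loopA rest (i + 1) (addFwdA i (i + 1) (matchesOf line) cards)

def part_two (file_content : List String) : Int :=
  (loopA file_content 0 (List.replicate file_content.length 1)).sum

-- ===== PORT B =====
-- B's loop: for i in range(n-1, -1, -1): count[i] = 1 + sum(count[i+j] for j in range(1, matches+1))
-- the fuel argument is the next index + 1 (so index i is processed when fuel = i+1)
def loopBdown : Nat → List String → List Int → List Int
  | 0, _, count => count
  | i + 1, fc, count =>
    let m := matchesOf (fc.getD i "")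
    let s : Int := ((List.range m).map (fun j => count.getD (i + 1 + j) 0)).sum
    loopBdown i fc (count.set i (1 + s))

def part_two_alt (file_content : List String) : Int :=
  (loopBdown file_content.length file_content (List.replicate file_content.length 1)).sum

-- ===== PRECONDITION & SPEC =====
-- Pre_ is exactly the set of inputs where Python A returns: every line contains ':'
-- (else split(":")[1] raises IndexError) and no card's matches reach past the last card
-- (else cards[i+j] raises IndexError); B raises on exactly the same inputs.
def Pre_part_two (file_content : List String) : Prop :=
  ∀ i < file_content.length,
    2 ≤ ((PySem.Str.split? (file_content.getD i "") ":").getD []).length ∧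
    i + matchesOf (file_content.getD i "") + 1 ≤ file_content.length
instance (file_content : List String) : Decidable (Pre_part_two file_content) := by
  unfold Pre_part_two; infer_instance

def pvWitness_part_two : List String := ["Card 1: 1 2 | 3 1", "Card 2: 1 | 2"]

def Spec_part_two (file_content : List String) (out : Int) : Prop := out = part_two_alt file_content
instance (file_content : List String) (out : Int) : Decidable (Spec_part_two file_content out) := by
  unfold Spec_part_two; infer_instance

-- ===== CLAIM (what is proved, stated in full; the proofs are below) =====
def Claim_equal_part_two : Prop := ∀ (file_content : List String), Dom_part_two file_content →
  Pre_part_two file_content → Spec_part_two file_content (part_two file_content)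

-- ===== LEMMAS AND PROOFS =====

theorem length_addFwdA (i : Nat) (m : Nat) : ∀ (idx : Nat) (cards : List Int),
    (addFwdA i idx m cards).length = cards.length := by
  induction m with
  | zero => intro idx cards; rfl
  | succ m' ih => intro idx cards; simp [addFwdA, ih]

theorem getD_addFwdA (i : Nat) (m : Nat) : ∀ (idx : Nat) (cards : List Int), i < idx →
    ∀ j, (addFwdA i idx m cards).getD j 0 =
      cards.getD j 0 + (if idx ≤ j ∧ j < idx + m ∧ j < cards.length then cards.getD i 0 else 0) := by
  induction m with
  | zero =>
    intro idx cards _ j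
    rw [if_neg (by omega : ¬ (idx ≤ j ∧ j < idx + 0 ∧ j < cards.length))]
    simp [addFwdA]
  | succ m' ih =>
    intro idx cards hlt j
    simp only [addFwdA]
    rw [ih (idx + 1) _ (by omega) j]
    have hv : ∀ j', idx ≠ j' →
        (cards.set idx (cards.getD idx 0 + cards.getD i 0)).getD j' 0 = cards.getD j' 0 := by
      intro j' hne
      simp [List.getD_eq_getElem?_getD, hne]
    simp only [List.length_set]
    rw [hv i (by omega)]
    by_cases hj : idx = j
    · subst hj
      rw [if_neg (by omega : ¬ (idx + 1 ≤ idx ∧ idx < idx + 1 + m' ∧ idx < cards.length))]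
      by_cases hr : idx < cards.length
      · rw [if_pos (by omega : idx ≤ idx ∧ idx < idx + (m' + 1) ∧ idx < cards.length)]
        have hset : (cards.set idx (cards.getD idx 0 + cards.getD i 0)).getD idx 0 =
            cards.getD idx 0 + cards.getD i 0 := by
          simp [List.getD_eq_getElem?_getD, hr]
        rw [hset]; ring
      · rw [if_neg (by omega : ¬ (idx ≤ idx ∧ idx < idx + (m' + 1) ∧ idx < cards.length))]
        have hset : (cards.set idx (cards.getD idx 0 + cards.getD i 0)).getD idx 0 =
            cards.getD idx 0 := by
          simp [List.getD_eq_getElem?_getD, hr]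
        rw [hset]
    · rw [hv j hj]
      by_cases h1 : idx + 1 ≤ j ∧ j < idx + 1 + m' ∧ j < cards.length
      · rw [if_pos h1, if_pos (by omega : idx ≤ j ∧ j < idx + (m' + 1) ∧ j < cards.length)]
      · rw [if_neg h1, if_neg (by omega : ¬ (idx ≤ j ∧ j < idx + (m' + 1) ∧ j < cards.length))]

theorem sum_getD_range : ∀ (l : List Int),
    ((List.range l.length).map (fun j => l.getD j 0)).sum = l.sum := by
  intro l
  induction l with
  | nil => rfl
  | cons x xs ih =>
    simp only [List.length_cons, List.range_succ_eq_map, List.map_cons, List.map_map, List.sum_cons]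
    simp only [Function.comp_def, Nat.succ_eq_add_one]
    simpa [List.getD_cons_succ] using congrArg (fun s => x + s) ih

-- sum over range L of a function truncated at m ≤ L
theorem sum_map_if_lt (m L : Nat) (f : Nat → Int) (h : m ≤ L) :
    ((List.range L).map (fun k => if k < m then f k else 0)).sum =
      ((List.range m).map f).sum := by
  obtain ⟨d, rfl⟩ := Nat.exists_eq_add_of_le h
  rw [List.range_add, List.map_append, List.sum_append, List.map_map]
  have h1 : (List.range m).map (fun k => if k < m then f k else 0) = (List.range m).map f := by
    apply List.map_congr_left
    intro a ha
    rw [if_pos (List.mem_range.mp ha)]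
  have h2 : ((List.range d).map ((fun k => if k < m then f k else 0) ∘ (m + ·))).sum = 0 := by
    apply List.sum_eq_zero
    intro x hx
    simp only [List.mem_map] at hx
    obtain ⟨a, _, rfl⟩ := hx
    simp [Function.comp]
  rw [h1, h2, add_zero]

-- loopBdown only changes indices below the fuel
theorem loopBdown_length : ∀ (i : Nat) (fc : List String) (count : List Int),
    (loopBdown i fc count).length = count.length := by
  intro i
  induction i with
  | zero => intro fc count; rfl
  | succ i' ih => intro fc count; simp [loopBdown, ih]

theorem loopBdown_getD_high : ∀ (i : Nat) (fc : List String) (count : List Int) (k : Nat),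
    i ≤ k → (loopBdown i fc count).getD k 0 = count.getD k 0 := by
  intro i
  induction i with
  | zero => intro fc count k _; rfl
  | succ i' ih =>
    intro fc count k hk
    simp only [loopBdown]
    rw [ih _ _ k (by omega)]
    simp [List.getD_eq_getElem?_getD, show ¬ i' = k from by omega]

-- the defining recurrence of B's table: each processed entry equals 1 + sum of the next matches entries
theorem loopBdown_getD_low : ∀ (i : Nat) (fc : List String) (count : List Int) (k : Nat),
    k < i → k < count.length →
    (loopBdown i fc count).getD k 0 =
      1 + ((List.range (matchesOf (fc.getD k ""))).map
            (fun j => (loopBdown i fc count).getD (k + 1 + j) 0)).sum := by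
  intro i
  induction i with
  | zero => intro fc count k hk _; omega
  | succ i' ih =>
    intro fc count k hk hkl
    by_cases hki : k < i'
    · exact ih fc _ k hki (by simpa using hkl)
    · obtain rfl : i' = k := by omega
      simp only [loopBdown]
      rw [loopBdown_getD_high i' fc _ i' (by omega)]
      have hset : (count.set i' (1 + ((List.range (matchesOf (fc.getD i' ""))).map
          (fun j => count.getD (i' + 1 + j) 0)).sum)).getD i' 0 =
          1 + ((List.range (matchesOf (fc.getD i' ""))).map
          (fun j => count.getD (i' + 1 + j) 0)).sum := by
        simp [List.getD_eq_getElem?_getD, hkl]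
      rw [hset]
      refine congrArg (fun s : Int => 1 + s) (congrArg List.sum (List.map_congr_left ?_))
      intro j _
      rw [loopBdown_getD_high i' fc _ (i' + 1 + j) (by omega)]
      rw [List.getD_eq_getElem?_getD, List.getD_eq_getElem?_getD, List.getElem?_set,
          if_neg (by omega : ¬ i' = i' + 1 + j)]

-- key invariant: A's final sum equals Σ_{k<i} cards[k] + Σ_k cards[i+k]·tv[k], where tv
-- satisfies B's backward recurrence on the remaining lines
set_option maxHeartbeats 1600000 in
theorem loopA_sum : ∀ (rest : List String) (i : Nat) (cards tv : List Int),
    cards.length = i + rest.length →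
    tv.length = rest.length →
    (∀ k < rest.length, k + matchesOf (rest.getD k "") + 1 ≤ rest.length) →
    (∀ k < rest.length, tv.getD k 0 =
      1 + ((List.range (matchesOf (rest.getD k ""))).map (fun j => tv.getD (k + 1 + j) 0)).sum) →
    (loopA rest i cards).sum =
      ((List.range i).map (fun k => cards.getD k 0)).sum +
      ((List.range rest.length).map (fun k => cards.getD (i + k) 0 * tv.getD k 0)).sum := by
  intro rest
  induction rest with
  | nil =>
    intro i cards tv hlen _ _ _
    simp only [loopA, List.length_nil, List.range_zero, List.map_nil, List.sum_nil, add_zero]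
    rw [show i = cards.length by simpa using hlen.symm]
    exact (sum_getD_range cards).symm
  | cons line rest' ih =>
    intro i cards tv hlen htvlen hpre htv
    obtain ⟨t0, tv', rfl⟩ : ∃ t0 tv', tv = t0 :: tv' := by
      cases tv with
      | nil => simp at htvlen
      | cons a b => exact ⟨a, b, rfl⟩
    have hL : cards.length = i + rest'.length + 1 := by simp at hlen; omega
    have htvlen' : tv'.length = rest'.length := by simpa using htvlen
    set m := matchesOf line with hm
    set c := cards.getD i 0 with hc
    have hmle : m ≤ rest'.length := by
      have := hpre 0 (by simp)
      simp only [List.getD_cons_zero, List.length_cons] at this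
      omega
    set cards' := addFwdA i (i + 1) m cards with hcards'
    have hC'get : ∀ j, cards'.getD j 0 =
        cards.getD j 0 + (if i + 1 ≤ j ∧ j < i + 1 + m ∧ j < cards.length then c else 0) :=
      getD_addFwdA i m (i + 1) cards (by omega)
    have hpre' : ∀ k < rest'.length, k + matchesOf (rest'.getD k "") + 1 ≤ rest'.length := by
      intro k hk
      have := hpre (k + 1) (by simp only [List.length_cons]; omega)
      simp only [List.getD_cons_succ, List.length_cons] at this
      omega
    have htv' : ∀ k < rest'.length, tv'.getD k 0 =
        1 + ((List.range (matchesOf (rest'.getD k ""))).map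
          (fun j => tv'.getD (k + 1 + j) 0)).sum := by
      intro k hk
      have := htv (k + 1) (by simp only [List.length_cons]; omega)
      simp only [List.getD_cons_succ] at this
      rw [this]
      refine congrArg (fun s : Int => 1 + s) (congrArg List.sum (List.map_congr_left ?_))
      intro j _
      rw [show k + 1 + 1 + j = (k + 1 + j) + 1 by omega, List.getD_cons_succ]
    have ht0 : t0 = 1 + ((List.range m).map (fun j => tv'.getD j 0)).sum := by
      have := htv 0 (by simp)
      simp only [List.getD_cons_zero] at this
      rw [this, hm]
      refine congrArg (fun s : Int => 1 + s) (congrArg List.sum (List.map_congr_left ?_))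
      intro j _
      rw [show 0 + 1 + j = j + 1 by omega, List.getD_cons_succ]
    simp only [loopA]
    rw [ih (i + 1) cards' tv'
      (by rw [hcards', length_addFwdA]; omega) htvlen' hpre' htv']
    -- E1: prefix sum including the new position i
    have E1 : ((List.range (i + 1)).map (fun k => cards'.getD k 0)).sum =
        ((List.range i).map (fun k => cards.getD k 0)).sum + c := by
      rw [List.range_succ, List.map_append, List.sum_append]
      have h1 : (List.range i).map (fun k => cards'.getD k 0) =
          (List.range i).map (fun k => cards.getD k 0) := by
        apply List.map_congr_left
        intro a ha
        have := List.mem_range.mp ha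
        rw [hC'get a, if_neg (by omega)]; ring
      have h2 : cards'.getD i 0 = c := by rw [hC'get i, if_neg (by omega), hc, add_zero]
      rw [h1]
      simp only [List.map_cons, List.map_nil, List.sum_cons, List.sum_nil, add_zero]
      rw [h2]
    -- E2: tail sum picks up c times the truncated tv' sum
    have E2 : ((List.range rest'.length).map
          (fun k => cards'.getD (i + 1 + k) 0 * tv'.getD k 0)).sum =
        ((List.range rest'.length).map
          (fun k => cards.getD (i + 1 + k) 0 * tv'.getD k 0)).sum +
        c * ((List.range m).map (fun j => tv'.getD j 0)).sum := by
      have hsplit : ∀ k < rest'.length,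
          cards'.getD (i + 1 + k) 0 * tv'.getD k 0 =
          cards.getD (i + 1 + k) 0 * tv'.getD k 0 +
          (if k < m then c * tv'.getD k 0 else 0) := by
        intro k hk
        rw [hC'get (i + 1 + k)]
        by_cases hkm : k < m
        · rw [if_pos (by omega : i + 1 ≤ i + 1 + k ∧ i + 1 + k < i + 1 + m ∧
              i + 1 + k < cards.length), if_pos hkm]
          ring
        · rw [if_neg (by omega : ¬ (i + 1 ≤ i + 1 + k ∧ i + 1 + k < i + 1 + m ∧
              i + 1 + k < cards.length)), if_neg hkm]
          ring
      have h1 : (List.range rest'.length).map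
            (fun k => cards'.getD (i + 1 + k) 0 * tv'.getD k 0) =
          (List.range rest'.length).map
            (fun k => cards.getD (i + 1 + k) 0 * tv'.getD k 0 +
              (if k < m then c * tv'.getD k 0 else 0)) := by
        apply List.map_congr_left
        intro a ha
        exact hsplit a (List.mem_range.mp ha)
      rw [h1]
      have h2 := List.sum_map_add (l := List.range rest'.length)
        (f := fun k => cards.getD (i + 1 + k) 0 * tv'.getD k 0)
        (g := fun k => if k < m then c * tv'.getD k 0 else 0)
      rw [h2, sum_map_if_lt m rest'.length (fun k => c * tv'.getD k 0) hmle,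
          ← List.sum_map_mul_left]
    -- RHS: peel the head of the (L'+1)-sum
    have E3 : ((List.range (rest').length.succ).map
          (fun k => cards.getD (i + k) 0 * (t0 :: tv').getD k 0)).sum =
        c * t0 + ((List.range rest'.length).map
          (fun k => cards.getD (i + 1 + k) 0 * tv'.getD k 0)).sum := by
      have hh : (List.range rest'.length).map
            ((fun k => cards.getD (i + k) 0 * (t0 :: tv').getD k 0) ∘ Nat.succ) =
          (List.range rest'.length).map
            (fun k => cards.getD (i + 1 + k) 0 * tv'.getD k 0) := by
        apply List.map_congr_left
        intro a _
        simp only [Function.comp_apply]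
        rw [List.getD_cons_succ, show i + (a + 1) = i + 1 + a by omega]
      rw [List.range_succ_eq_map, List.map_cons, List.map_map, List.sum_cons, hh]
      simp [hc]
    simp only [List.length_cons]
    rw [E1, E2]
    rw [show rest'.length + 1 = rest'.length.succ from rfl, E3, ht0]
    ring

-- ===== VERDICT (by name: the statement is the Claim_ definition above) =====
theorem part_two_spec : Claim_equal_part_two := by
  intro fc _ hpre
  unfold Spec_part_two part_two part_two_alt
  have hTlen : (loopBdown fc.length fc (List.replicate fc.length 1)).length = fc.length := by
    rw [loopBdown_length]; simp
  have hTrec : ∀ k < fc.length,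
      (loopBdown fc.length fc (List.replicate fc.length 1)).getD k 0 =
      1 + ((List.range (matchesOf (fc.getD k ""))).map
        (fun j => (loopBdown fc.length fc (List.replicate fc.length 1)).getD (k + 1 + j) 0)).sum :=
    fun k hk => loopBdown_getD_low fc.length fc _ k hk (by simpa using hk)
  rw [loopA_sum fc 0 (List.replicate fc.length 1) _ (by simp) hTlen
    (fun k hk => (hpre k hk).2) hTrec]
  have h2 := sum_getD_range (loopBdown fc.length fc (List.replicate fc.length 1))
  rw [hTlen] at h2
  have h1 : ∀ k ∈ List.range fc.length,
      (List.replicate fc.length (1 : Int)).getD k 0 *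
        (loopBdown fc.length fc (List.replicate fc.length 1)).getD k 0 =
      (loopBdown fc.length fc (List.replicate fc.length 1)).getD k 0 := by
    intro k hk
    rw [List.getD_replicate 1 (List.mem_range.mp hk), one_mul]
  simp only [List.range_zero, List.map_nil, List.sum_nil, zero_add]
  rw [List.map_congr_left h1, h2]
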